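-- pv_equiv track=rewrite | github.com/farzonl/ipython_demo | helper.py | getVertsAndFaces
-- ===== SOURCE A (Python) =====
-- def getVertsAndFaces(faces):
--
--     # Generate verts and faces lists, without duplicates
--     verts = []
--     coords = {}
--     index_tot = 0
--     facesIndices = []
--
--     for f in faces:  # iterates faces
--         fi = []
--         for (_, [x, y, z, w]) in enumerate(f):
--             v = (x, y, z, w)
--             index = coords.get(
--                 v
--             )  # checks if vertex is inside coords dict to get vertex number id
--
--             if index is None:
--                 index = coords[v] = index_tot  # assignes next vertex number id
--                 index_tot += 1  # increments vertex number id
--                 verts.append(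
--                     v
--                 )  # adds vertex to vertices array if it has not yet been iterated
--
--             fi.append(
--                 index
--             )  # adds vertex number id to vertex array to resolve face from vertex ids
--
--         facesIndices.append(fi)  # adds vertex id array to face array
--     return (verts, facesIndices)
-- ===== SOURCE B (Python) =====
-- def getVertsAndFaces(faces):
--     # Pass 1: build the vertex -> first-appearance-index table.
--     coords = {}
--     for f in faces:
--         for (_, [x, y, z, w]) in enumerate(f):
--             coords.setdefault((x, y, z, w), len(coords))
--     # Pass 2: map every face through the finished table.
--     verts = list(coords.keys())
--     facesIndices = [[coords[(x, y, z, w)] for (_, [x, y, z, w]) in enumerate(f)] for f in faces]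
--     return (verts, facesIndices)
-- ===== Notes on version B (the rewrite author's own statement) =====
-- stated objective: alternative
-- what changed: A's single fused loop that simultaneously grows verts, coords and the face index lists is split into two separate passes: one pass builds the first-appearance index table with setdefault, then verts is read off the dict keys and the face index lists are produced by a pure mapping pass over the finished table.
import Mathlib
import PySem

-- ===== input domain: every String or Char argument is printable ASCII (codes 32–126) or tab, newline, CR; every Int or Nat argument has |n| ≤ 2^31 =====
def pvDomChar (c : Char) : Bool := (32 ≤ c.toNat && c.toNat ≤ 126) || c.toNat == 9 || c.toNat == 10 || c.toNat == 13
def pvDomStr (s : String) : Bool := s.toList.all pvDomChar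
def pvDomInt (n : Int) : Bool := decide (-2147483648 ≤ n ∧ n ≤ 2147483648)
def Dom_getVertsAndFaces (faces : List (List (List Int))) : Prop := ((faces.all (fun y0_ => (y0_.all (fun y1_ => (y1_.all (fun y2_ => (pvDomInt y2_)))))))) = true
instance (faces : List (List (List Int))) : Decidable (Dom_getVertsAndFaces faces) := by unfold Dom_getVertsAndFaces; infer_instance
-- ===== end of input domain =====

-- B splits A's single fused loop into a first pass that only builds the first-appearance
-- index table and a second pure mapping pass over the finished table (objective: alternative).

-- shared helper: the '(_, [x, y, z, w])' unpacking; on a 4-element vertex it is exact,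
-- inputs with a differently-sized vertex raise ValueError in Python and are excluded by Pre_
def pvToV4 (l : List Int) : Int × Int × Int × Int :=
  match l with
  | [x, y, z, w] => (x, y, z, w)
  | _ => (0, 0, 0, 0)

-- ===== PORT A =====
-- A's inner loop body: state = (verts, coords, index_tot, fi)
def pvStepA
    (s : List (Int × Int × Int × Int) × PySem.Dict (Int × Int × Int × Int) Int × Int × List Int)
    (vl : List Int) :
    List (Int × Int × Int × Int) × PySem.Dict (Int × Int × Int × Int) Int × Int × List Int :=
  let v := pvToV4 vl
  match PySem.Dict.get? s.2.1 v with
  | some index => (s.1, s.2.1, s.2.2.1, s.2.2.2 ++ [index])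
  | none => (s.1 ++ [v], PySem.Dict.insert s.2.1 v s.2.2.1, s.2.2.1 + 1, s.2.2.2 ++ [s.2.2.1])

-- A's outer loop body: state = (verts, coords, index_tot, facesIndices)
def pvFaceA
    (s : List (Int × Int × Int × Int) × PySem.Dict (Int × Int × Int × Int) Int × Int × List (List Int))
    (f : List (List Int)) :
    List (Int × Int × Int × Int) × PySem.Dict (Int × Int × Int × Int) Int × Int × List (List Int) :=
  let inner := f.foldl pvStepA (s.1, s.2.1, s.2.2.1, ([] : List Int))
  (inner.1, inner.2.1, inner.2.2.1, s.2.2.2 ++ [inner.2.2.2])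

def getVertsAndFaces (faces : List (List (List Int))) : (List (Int × Int × Int × Int)) × List (List Int) :=
  let r := faces.foldl pvFaceA ([], PySem.Dict.empty, 0, [])
  (r.1, r.2.2.2)

-- ===== PORT B =====
-- B's pass-1 inner loop: coords.setdefault(v, len(coords))
def pvInnerB (d : PySem.Dict (Int × Int × Int × Int) Int) (f : List (List Int)) :
    PySem.Dict (Int × Int × Int × Int) Int :=
  f.foldl (fun d vl => PySem.Dict.setdefault d (pvToV4 vl) (d.size : Int)) d

def getVertsAndFaces_alt (faces : List (List (List Int))) : (List (Int × Int × Int × Int)) × List (List Int) :=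
  let coords := faces.foldl (fun d f => pvInnerB d f) PySem.Dict.empty
  let verts := PySem.Dict.keys coords
  let facesIndices := faces.map (fun f => f.map (fun vl => PySem.Dict.getD coords (pvToV4 vl) 0))
  (verts, facesIndices)

-- ===== PRECONDITION & SPEC =====
-- Pre_ excludes inputs containing a vertex list whose length is not 4, on which Python A's
-- '(_, [x, y, z, w])' unpacking raises ValueError (B raises identically).
def Pre_getVertsAndFaces (faces : List (List (List Int))) : Prop :=
  (faces.all (fun f => f.all (fun vl => vl.length == 4))) = true
instance (faces : List (List (List Int))) : Decidable (Pre_getVertsAndFaces faces) := by unfold Pre_getVertsAndFaces; infer_instance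

def pvWitness_getVertsAndFaces : List (List (List Int)) :=
  [[[0, 0, 0, 1], [1, 0, 0, 1], [0, 1, 0, 1]], [[0, 0, 0, 1], [1, 0, 0, 1], [1, 1, 0, 1]]]

def Spec_getVertsAndFaces (faces : List (List (List Int))) (out : (List (Int × Int × Int × Int)) × List (List Int)) : Prop := out = getVertsAndFaces_alt faces
instance (faces : List (List (List Int))) (out : (List (Int × Int × Int × Int)) × List (List Int)) : Decidable (Spec_getVertsAndFaces faces out) := by unfold Spec_getVertsAndFaces; infer_instance

-- ===== CLAIM (what is proved, stated in full; the proofs are below) =====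
def Claim_equal_getVertsAndFaces : Prop := ∀ (faces : List (List (List Int))), Dom_getVertsAndFaces faces → Pre_getVertsAndFaces faces → Spec_getVertsAndFaces faces (getVertsAndFaces faces)

-- ===== LEMMAS AND PROOFS =====

-- lookups are preserved by setdefault (keys are never overwritten)
theorem pv_sub_setdefault (d : PySem.Dict (Int × Int × Int × Int) Int)
    (v : Int × Int × Int × Int) (x : Int) (k : Int × Int × Int × Int) (i : Int)
    (h : d.get? k = some i) : (d.setdefault v x).get? k = some i := by
  by_cases hc : d.contains v = true
  · rw [PySem.Dict.setdefault_of_contains d x hc]; exact h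
  · rw [PySem.Dict.setdefault_of_not_contains d x (by simpa using hc)]
    have hvnone : d.get? v = none := by
      rw [PySem.Dict.contains_eq_isSome_get?] at hc
      cases hv : d.get? v with
      | none => rfl
      | some w => rw [hv] at hc; simp at hc
    have hne : k ≠ v := fun he => by rw [he, hvnone] at h; cases h
    rw [PySem.Dict.get?_insert_of_ne d x hne]; exact h

theorem pv_sub_innerB (f : List (List Int)) (d : PySem.Dict (Int × Int × Int × Int) Int)
    (k : Int × Int × Int × Int) (i : Int) (h : d.get? k = some i) :
    (pvInnerB d f).get? k = some i := by
  induction f generalizing d with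
  | nil => exact h
  | cons vl f' ih =>
      exact ih _ (pv_sub_setdefault d (pvToV4 vl) (d.size : Int) k i h)

theorem pv_sub_buildB (fs : List (List (List Int))) (d : PySem.Dict (Int × Int × Int × Int) Int)
    (k : Int × Int × Int × Int) (i : Int) (h : d.get? k = some i) :
    (fs.foldl (fun d f => pvInnerB d f) d).get? k = some i := by
  induction fs generalizing d with
  | nil => exact h
  | cons f fs' ih => exact ih _ (pv_sub_innerB f d k i h)

theorem pv_mem_innerB (f : List (List Int)) (d : PySem.Dict (Int × Int × Int × Int) Int)
    (vl : List Int) (hm : vl ∈ f) : ((pvInnerB d f).get? (pvToV4 vl)).isSome := by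
  induction f generalizing d with
  | nil => cases hm
  | cons a f' ih =>
      rcases List.mem_cons.mp hm with he | ht
      · subst he
        show ((pvInnerB (d.setdefault (pvToV4 vl) (d.size : Int)) f').get? (pvToV4 vl)).isSome
        have := PySem.Dict.get?_setdefault_self d (pvToV4 vl) (d.size : Int)
        have h2 := pv_sub_innerB f' _ (pvToV4 vl) _ this
        rw [h2]; rfl
      · exact ih _ ht

-- A's inner loop, run from a state consistent with dict d, produces exactly B's pass-1 dict
-- plus the face indices looked up in that dict
theorem pv_innerA_spec (f : List (List Int)) (d : PySem.Dict (Int × Int × Int × Int) Int)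
    (verts : List (Int × Int × Int × Int)) (fi : List Int) (hv : verts = d.keys) :
    f.foldl pvStepA (verts, d, (d.size : Int), fi) =
      ((pvInnerB d f).keys, pvInnerB d f, ((pvInnerB d f).size : Int),
        fi ++ f.map (fun vl => ((pvInnerB d f).get? (pvToV4 vl)).getD 0)) := by
  induction f generalizing d verts fi with
  | nil => simp [pvInnerB, hv]
  | cons vl f' ih =>
      have hcont := PySem.Dict.contains_eq_isSome_get? d (pvToV4 vl)
      cases h : d.get? (pvToV4 vl) with
      | some i =>
          have hc : d.contains (pvToV4 vl) = true := by rw [hcont, h]; rfl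
          have hd1 : pvInnerB d (vl :: f') = pvInnerB d f' := by
            show pvInnerB (d.setdefault (pvToV4 vl) (d.size : Int)) f' = pvInnerB d f'
            rw [PySem.Dict.setdefault_of_contains d _ hc]
          have hstep : pvStepA (verts, d, (d.size : Int), fi) vl =
              (verts, d, (d.size : Int), fi ++ [i]) := by
            simp [pvStepA, h]
          rw [List.foldl_cons, hstep, ih d verts (fi ++ [i]) hv, hd1]
          have hlook : ((pvInnerB d f').get? (pvToV4 vl)).getD 0 = i := by
            rw [pv_sub_innerB f' d _ i h]; rfl
          simp [hlook]
      | none =>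
          have hc : d.contains (pvToV4 vl) = false := by rw [hcont, h]; rfl
          have hd1 : pvInnerB d (vl :: f') = pvInnerB (d.insert (pvToV4 vl) (d.size : Int)) f' := by
            show pvInnerB (d.setdefault (pvToV4 vl) (d.size : Int)) f' = _
            rw [PySem.Dict.setdefault_of_not_contains d _ hc]
          have hstep : pvStepA (verts, d, (d.size : Int), fi) vl =
              (verts ++ [pvToV4 vl], d.insert (pvToV4 vl) (d.size : Int),
                (d.size : Int) + 1, fi ++ [(d.size : Int)]) := by
            simp [pvStepA, h]
          have hkeys : verts ++ [pvToV4 vl] = (d.insert (pvToV4 vl) (d.size : Int)).keys := by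
            rw [PySem.Dict.keys_insert_of_not_contains d _ hc, hv]
          have hsize : ((d.insert (pvToV4 vl) (d.size : Int)).size : Int) = (d.size : Int) + 1 := by
            rw [PySem.Dict.size_insert, hc]; simp
          rw [List.foldl_cons, hstep, ← hsize,
            ih (d.insert (pvToV4 vl) (d.size : Int)) _ _ hkeys, hd1]
          have hlook : ((pvInnerB (d.insert (pvToV4 vl) (d.size : Int)) f').get? (pvToV4 vl)).getD 0
              = (d.size : Int) := by
            rw [pv_sub_innerB f' _ _ _ (PySem.Dict.get?_insert_self d (pvToV4 vl) (d.size : Int))]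
            rfl
          simp [hlook]

-- A's outer loop equals B's two passes over the same suffix
theorem pv_outerA_spec (fs : List (List (List Int))) (d : PySem.Dict (Int × Int × Int × Int) Int)
    (verts : List (Int × Int × Int × Int)) (fis : List (List Int)) (hv : verts = d.keys) :
    fs.foldl pvFaceA (verts, d, (d.size : Int), fis) =
      (let D := fs.foldl (fun d f => pvInnerB d f) d
       (D.keys, D, (D.size : Int),
        fis ++ fs.map (fun f => f.map (fun vl => (D.get? (pvToV4 vl)).getD 0)))) := by
  induction fs generalizing d verts fis with
  | nil => simp [hv]
  | cons f fs' ih =>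
      have hface : pvFaceA (verts, d, (d.size : Int), fis) f =
          ((pvInnerB d f).keys, pvInnerB d f, ((pvInnerB d f).size : Int),
            fis ++ [f.map (fun vl => ((pvInnerB d f).get? (pvToV4 vl)).getD 0)]) := by
        show (let inner := f.foldl pvStepA (verts, d, (d.size : Int), ([] : List Int))
              (inner.1, inner.2.1, inner.2.2.1, fis ++ [inner.2.2.2])) = _
        rw [pv_innerA_spec f d verts [] hv]; simp
      rw [List.foldl_cons, hface, ih (pvInnerB d f) _ _ rfl]
      have hmap : f.map (fun vl => ((pvInnerB d f).get? (pvToV4 vl)).getD 0) =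
          f.map (fun vl =>
            ((fs'.foldl (fun d f => pvInnerB d f) (pvInnerB d f)).get? (pvToV4 vl)).getD 0) := by
        apply List.map_congr_left
        intro vl hm
        have h1 := pv_mem_innerB f d vl hm
        cases h : (pvInnerB d f).get? (pvToV4 vl) with
        | none => rw [h] at h1; simp at h1
        | some i =>
            rw [pv_sub_buildB fs' (pvInnerB d f) (pvToV4 vl) i h]
      simp only [List.map_cons, hmap]
      simp

-- ===== VERDICT (by name: the statement is the Claim_ definition above) =====
theorem getVertsAndFaces_spec : Claim_equal_getVertsAndFaces := by
  intro faces _ _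
  unfold Spec_getVertsAndFaces getVertsAndFaces getVertsAndFaces_alt
  have h0 : ((PySem.Dict.empty : PySem.Dict (Int × Int × Int × Int) Int).size : Int) = 0 := by
    rw [PySem.Dict.size_empty]; rfl
  rw [show ((0 : Int)) = ((PySem.Dict.empty : PySem.Dict (Int × Int × Int × Int) Int).size : Int) from h0.symm]
  rw [pv_outerA_spec faces PySem.Dict.empty [] [] PySem.Dict.keys_empty.symm]
  simp [PySem.Dict.getD_eq_get?_getD]
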